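-- pv_equiv track=rewrite | github.com/jpsank/finalproject | src/eatpi-try1/nn/graphs.py | feed_forward_layers
-- ===== SOURCE A (Python) =====
-- def required_for_output(inputs, outputs, connections):
--     """
--     Collect the nodes whose state is required to compute the final network output(s).
--     :param inputs: list of the input identifiers
--     :param outputs: list of the output node identifiers
--     :param connections: list of (input, output) connections in the network.
--     NOTE: It is assumed that the input identifier set and the node identifier set are disjoint.
--     By convention, the output node ids are always the same as the output index.
--     Returns a set of identifiers of required nodes, not including inputs.
--     """
--
--     # This process is analogous to an infection, starting at the output nodes and iterating backwards,
--     # "infecting" nodes that connect to other infected nodes. Thus, nodes that do not connect to an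
--     # eventual output will avoid infection; these nodes are Not Required.
--
--     infected = set(outputs)
--     while True:
--         # Newly infect nodes that connect to an already-infected node
--         nodes_to_infect = set(a for (a, b) in connections if a not in infected and b in infected)
--         if not nodes_to_infect:
--             # No more new nodes that connect to an eventual output. Done iterating backwards
--             break
--
--         infected = infected.union(nodes_to_infect)
--
--     return infected - set(inputs)
--
-- def feed_forward_layers(inputs, outputs, connections):
--     """
--     Collect the layers whose members can be evaluated in parallel in a feed-forward network.
--     :param inputs: list of the network input nodes
--     :param outputs: list of the output node identifiers
--     :param connections: list of (input, output) connections in the network.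
--     Returns a list of layers, with each layer consisting of a set of node identifiers.
--     Note that the returned layers do not contain nodes whose output is ultimately
--     never used to compute the final network output.
--     """
--
--     required = required_for_output(inputs, outputs, connections)
--
--     layers = []
--     s = set(inputs)
--     while 1:
--         next_nodes = set()
--         # Find candidate nodes c for the next layer.  These nodes should connect
--         # a node in s to a node not in s.
--         candidates = set(b for (a, b) in connections if a in s and b not in s)
--         # Keep only the used nodes whose entire input set is contained in s.
--         for candidate in candidates:
--             input_set = (i for (i, o) in connections if o == candidate)
--             if candidate in required and all(i in s for i in input_set):
--                 next_nodes.add(candidate)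
--
--         if not next_nodes:
--             break
--
--         layers.append(next_nodes)
--         s = s.union(next_nodes)
--
--     return layers
-- ===== SOURCE B (Python) =====
-- def feed_forward_layers(inputs, outputs, connections):
--     # Build predecessor lists and the targets in first-occurrence order, once.
--     preds = {}
--     order = []
--     for a, b in connections:
--         if b not in preds:
--             preds[b] = []
--             order.append(b)
--         preds[b].append(a)
--
--     # Required nodes: expand a frontier backwards from the outputs along preds.
--     required = set(outputs)
--     frontier = set(outputs)
--     while frontier:
--         new = {p for n in frontier for p in preds.get(n, ()) if p not in required}
--         required |= new
--         frontier = new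
--     required -= set(inputs)
--
--     # Layering: each round, the unevaluated required targets whose predecessors
--     # are all already evaluated form the next layer.
--     s = set(inputs)
--     layers = []
--     while True:
--         layer = [t for t in order
--                  if t not in s and t in required
--                  and all(p in s for p in preds[t])]
--         if not layer:
--             break
--         layers.append(set(layer))
--         s.update(layer)
--     return layers
-- ===== Notes on version B (the rewrite author's own statement) =====
-- stated objective: alternative
-- what changed: B builds predecessor-adjacency lists and the first-occurrence target order once, computes the required set by frontier expansion backwards from the outputs along those lists, and forms each layer by filtering the target list against the precomputed predecessor lists — instead of A's repeated full rescans of the connection list (global fixpoint iteration for 'required', and per-layer candidate generation plus a fresh full connection scan per candidate).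
import Mathlib
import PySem

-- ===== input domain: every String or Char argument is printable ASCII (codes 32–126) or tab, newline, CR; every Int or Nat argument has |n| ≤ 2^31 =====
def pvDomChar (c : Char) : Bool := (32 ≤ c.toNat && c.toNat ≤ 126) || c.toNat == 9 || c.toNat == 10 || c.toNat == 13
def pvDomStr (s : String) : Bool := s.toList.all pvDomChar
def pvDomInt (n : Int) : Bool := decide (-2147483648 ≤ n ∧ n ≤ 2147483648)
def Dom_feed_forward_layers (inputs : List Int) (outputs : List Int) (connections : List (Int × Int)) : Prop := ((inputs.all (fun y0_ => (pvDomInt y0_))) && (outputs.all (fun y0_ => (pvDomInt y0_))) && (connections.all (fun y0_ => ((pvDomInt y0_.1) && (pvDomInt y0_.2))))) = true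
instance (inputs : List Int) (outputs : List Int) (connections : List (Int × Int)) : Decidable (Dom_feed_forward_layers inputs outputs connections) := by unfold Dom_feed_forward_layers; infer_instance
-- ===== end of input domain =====

-- B replaces A's repeated full connection-list rescans by predecessor lists built once
-- (frontier expansion for the required set, target-list filtering for the layers).


-- ===== PORT A =====
-- set(a for (a, b) in connections if a not in infected and b in infected)
def pvInfectStep (connections : List (Int × Int)) (infected : PySem.Set Int) : PySem.Set Int :=
  PySem.Set.ofList ((connections.filter (fun ab =>
    !(PySem.Set.contains infected ab.1) && PySem.Set.contains infected ab.2)).map (fun ab => ab.1))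

-- the 'while True' loop of required_for_output; each non-final round infects at least one
-- new connection source, so fuel connections.length + 1 covers every round the Python runs
def pvInfectLoop (connections : List (Int × Int)) : Nat → PySem.Set Int → PySem.Set Int
  | 0, infected => infected
  | n+1, infected =>
    let nti := pvInfectStep connections infected
    if nti.isEmpty then infected
    else pvInfectLoop connections n (PySem.Set.union infected nti)

def pvRequiredForOutput (inputs : List Int) (outputs : List Int) (connections : List (Int × Int)) : PySem.Set Int :=
  PySem.Set.diff (pvInfectLoop connections (connections.length + 1) (PySem.Set.ofList outputs))
    (PySem.Set.ofList inputs)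

-- set(b for (a, b) in connections if a in s and b not in s)
def pvCandidates (connections : List (Int × Int)) (s : PySem.Set Int) : PySem.Set Int :=
  PySem.Set.ofList ((connections.filter (fun ab =>
    PySem.Set.contains s ab.1 && !(PySem.Set.contains s ab.2))).map (fun ab => ab.2))

-- the 'for candidate in candidates' loop building next_nodes (a set: order-insensitive)
def pvNext (connections : List (Int × Int)) (required : PySem.Set Int) (s : PySem.Set Int) : PySem.Set Int :=
  (pvCandidates connections s).foldl (fun ns c =>
    if PySem.Set.contains required c &&
       ((connections.filter (fun io => io.2 == c)).all (fun io => PySem.Set.contains s io.1))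
    then PySem.Set.add ns c else ns) PySem.Set.empty

-- the 'while 1' loop; each non-final round adds at least one new connection target to s,
-- so fuel connections.length + 1 covers every round the Python runs
def pvLayersLoop (connections : List (Int × Int)) (required : PySem.Set Int) :
    Nat → List (List Int) → PySem.Set Int → List (List Int)
  | 0, layers, _ => layers
  | n+1, layers, s =>
    let nn := pvNext connections required s
    if nn.isEmpty then layers
    else pvLayersLoop connections required n (layers ++ [nn]) (PySem.Set.union s nn)

def feed_forward_layers (inputs : List Int) (outputs : List Int) (connections : List (Int × Int)) : List (List Int) :=
  pvLayersLoop connections (pvRequiredForOutput inputs outputs connections)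
    (connections.length + 1) [] (PySem.Set.ofList inputs)

-- ===== PORT B =====
-- body of B's preds/order building loop
def pvPredsStep (st : PySem.Dict Int (List Int) × List Int) (ab : Int × Int) :
    PySem.Dict Int (List Int) × List Int :=
  if st.1.contains ab.2 then (st.1.modify ab.2 [] (fun l => l ++ [ab.1]), st.2)
  else ((st.1.insert ab.2 []).modify ab.2 [] (fun l => l ++ [ab.1]), st.2 ++ [ab.2])

def pvBuildPreds (connections : List (Int × Int)) : PySem.Dict Int (List Int) × List Int :=
  connections.foldl pvPredsStep ((PySem.Dict.empty : PySem.Dict Int (List Int)), [])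

-- {p for n in frontier for p in preds.get(n, ()) if p not in required}
def pvFrontierStep (preds : PySem.Dict Int (List Int)) (required frontier : PySem.Set Int) : PySem.Set Int :=
  frontier.foldl (fun acc n =>
    (preds.getD n []).foldl (fun acc p =>
      if !(PySem.Set.contains required p) then PySem.Set.add acc p else acc) acc)
    PySem.Set.empty

-- B's 'while frontier' loop; fuel connections.length + 1 covers every round the Python runs
def pvReqLoop (preds : PySem.Dict Int (List Int)) :
    Nat → PySem.Set Int → PySem.Set Int → PySem.Set Int
  | 0, required, _ => required
  | n+1, required, frontier =>
    if frontier.isEmpty then required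
    else
      let nw := pvFrontierStep preds required frontier
      pvReqLoop preds n (PySem.Set.union required nw) nw

-- [t for t in order if t not in s and t in required and all(p in s for p in preds[t])]
def pvLayerOf (preds : PySem.Dict Int (List Int)) (order : List Int) (required s : PySem.Set Int) : List Int :=
  order.filter (fun t => !(PySem.Set.contains s t) && PySem.Set.contains required t &&
    (preds.getD t []).all (fun p => PySem.Set.contains s p))

-- B's 'while True' loop; fuel connections.length + 1 covers every round the Python runs
def pvAltLoop (preds : PySem.Dict Int (List Int)) (order : List Int) (required : PySem.Set Int) :
    Nat → List (List Int) → PySem.Set Int → List (List Int)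
  | 0, layers, _ => layers
  | n+1, layers, s =>
    let layer := pvLayerOf preds order required s
    if layer.isEmpty then layers
    else pvAltLoop preds order required n (layers ++ [PySem.Set.ofList layer]) (PySem.Set.update s layer)

def feed_forward_layers_alt (inputs : List Int) (outputs : List Int) (connections : List (Int × Int)) : List (List Int) :=
  let pr := pvBuildPreds connections
  let required0 := pvReqLoop pr.1 (connections.length + 1) (PySem.Set.ofList outputs) (PySem.Set.ofList outputs)
  let required := PySem.Set.diff required0 (PySem.Set.ofList inputs)
  pvAltLoop pr.1 pr.2 required (connections.length + 1) [] (PySem.Set.ofList inputs)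

-- ===== PRECONDITION & SPEC =====
def Spec_feed_forward_layers (inputs : List Int) (outputs : List Int) (connections : List (Int × Int)) (out : List (List Int)) : Prop := out = feed_forward_layers_alt inputs outputs connections
instance (inputs : List Int) (outputs : List Int) (connections : List (Int × Int)) (out : List (List Int)) : Decidable (Spec_feed_forward_layers inputs outputs connections out) := by unfold Spec_feed_forward_layers; infer_instance

-- ===== CLAIM (what is proved, stated in full; the proofs are below) =====
def Claim_equal_feed_forward_layers : Prop := ∀ (inputs : List Int) (outputs : List Int) (connections : List (Int × Int)), Dom_feed_forward_layers inputs outputs connections → Spec_feed_forward_layers inputs outputs connections (feed_forward_layers inputs outputs connections)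

-- ===== LEMMAS AND PROOFS =====

def pvMemEq (s t : List Int) : Prop := ∀ x : Int, x ∈ s ↔ x ∈ t

theorem pvContains_eq {s t : List Int} (h : pvMemEq s t) :
    PySem.Set.contains s = PySem.Set.contains t := by
  funext x
  rw [Bool.eq_iff_iff, PySem.Set.contains_iff, PySem.Set.contains_iff]
  exact h x

theorem pvMem_infectStep (connections : List (Int × Int)) (inf : PySem.Set Int) (x : Int) :
    x ∈ pvInfectStep connections inf ↔
      ∃ ab ∈ connections, ab.1 = x ∧ x ∉ inf ∧ ab.2 ∈ inf := by
  simp [pvInfectStep, PySem.Set.mem_ofList, List.mem_map, List.mem_filter]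

theorem pvOfList_filter (l : List Int) (p : Int → Bool) :
    (PySem.Set.ofList l).filter p = PySem.Set.ofList (l.filter p) := by
  induction l using List.reverseRecOn with
  | nil => simp
  | append_singleton l x ih =>
    rw [PySem.Set.ofList_append_singleton, List.filter_append]
    by_cases hp : p x
    · have hfx : List.filter p [x] = [x] := by simp [hp]
      rw [hfx]
      by_cases hx : x ∈ l
      · rw [PySem.Set.add_of_mem (by simp [PySem.Set.mem_ofList, hx]), ih,
          PySem.Set.ofList_append_singleton,
          PySem.Set.add_of_mem (by simp [PySem.Set.mem_ofList, List.mem_filter, hx, hp])]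
      · rw [PySem.Set.add_of_not_mem (by simp [PySem.Set.mem_ofList, hx]), List.filter_append,
          hfx, ih, PySem.Set.ofList_append_singleton,
          PySem.Set.add_of_not_mem (by simp [PySem.Set.mem_ofList, List.mem_filter, hx])]
    · have hfx : List.filter p [x] = [] := by simp [hp]
      rw [hfx, List.append_nil]
      by_cases hx : x ∈ l
      · rw [PySem.Set.add_of_mem (by simp [PySem.Set.mem_ofList, hx]), ih]
      · rw [PySem.Set.add_of_not_mem (by simp [PySem.Set.mem_ofList, hx]), List.filter_append,
          hfx, List.append_nil, ih]

theorem pvFilter_mapSnd_filter (l : List (Int × Int)) (p : Int → Bool) (q : Int × Int → Bool)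
    (h : ∀ ab ∈ l, p ab.2 = true → q ab = true) :
    ((l.filter q).map (fun ab => ab.2)).filter p = (l.map (fun ab => ab.2)).filter p := by
  induction l with
  | nil => rfl
  | cons ab rest ih =>
    have ihr := ih (fun x hx => h x (List.mem_cons_of_mem _ hx))
    by_cases hq : q ab
    · simp [List.filter, hq, ihr]
    · have hp : p ab.2 = false := by
        by_contra hc
        exact hq (h ab (List.mem_cons_self ..) (by revert hc; cases p ab.2 <;> simp))
      simp [List.filter, hq, hp, ihr]

theorem pvPredsStep_fst_getD (pr : PySem.Dict Int (List Int)) (ord : List Int) (ab : Int × Int)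
    (y : Int) : ((pvPredsStep (pr, ord) ab).1).getD y [] =
      pr.getD y [] ++ (if ab.2 = y then [ab.1] else []) := by
  unfold pvPredsStep
  by_cases hc : pr.contains ab.2 = true
  · rw [if_pos hc, PySem.Dict.getD_modify]
    by_cases hy : y = ab.2
    · subst hy; simp
    · simp [hy, Ne.symm hy]
  · rw [if_neg hc, PySem.Dict.getD_modify]
    by_cases hy : y = ab.2
    · subst hy
      rw [if_pos rfl, if_pos rfl, PySem.Dict.getD_insert_self,
        PySem.Dict.getD_of_not_contains (h := by simp [hc])]
    · rw [if_neg hy, if_neg (Ne.symm hy), List.append_nil, PySem.Dict.getD_insert,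
        if_neg hy]
theorem pvBuildPreds_getD_aux (conn : List (Int × Int)) :
    ∀ (pr : PySem.Dict Int (List Int)) (ord : List Int) (x : Int),
      ((conn.foldl pvPredsStep (pr, ord)).1).getD x [] =
        pr.getD x [] ++ (conn.filter (fun p => p.2 == x)).map (fun p => p.1) := by
  induction conn with
  | nil => intro pr ord x; simp
  | cons ab rest ih =>
    intro pr ord x
    rw [List.foldl_cons]
    have hstep := pvPredsStep_fst_getD pr ord ab x
    have : (pvPredsStep (pr, ord) ab) = ((pvPredsStep (pr, ord) ab).1, (pvPredsStep (pr, ord) ab).2) := rfl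
    rw [this, ih, hstep]
    by_cases hb : ab.2 = x
    · simp [hb]
    · simp [hb] 

theorem pvBuildPreds_getD (connections : List (Int × Int)) (x : Int) :
    (pvBuildPreds connections).1.getD x [] =
      (connections.filter (fun p => p.2 == x)).map (fun p => p.1) := by
  rw [pvBuildPreds, pvBuildPreds_getD_aux]
  simp

theorem pvPredsStep_snd_keys (pr : PySem.Dict Int (List Int)) (ord : List Int) (ab : Int × Int)
    (h : ord = pr.keys) :
    (pvPredsStep (pr, ord) ab).2 = PySem.Set.add ord ab.2 ∧
      (pvPredsStep (pr, ord) ab).2 = ((pvPredsStep (pr, ord) ab).1).keys := by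
  unfold pvPredsStep
  dsimp only
  by_cases hc : pr.contains ab.2 = true
  · have hmem : ab.2 ∈ ord := h ▸ (PySem.Dict.contains_iff_mem_keys _ _).mp hc
    rw [if_pos hc]
    refine ⟨(PySem.Set.add_of_mem hmem).symm, ?_⟩
    show ord = (pr.modify ab.2 [] (fun l => l ++ [ab.1])).keys
    rw [PySem.Dict.keys_modify, PySem.Dict.keys_insert_of_contains _ _ hc]
    exact h
  · have hmem : ab.2 ∉ ord := fun hm => hc ((PySem.Dict.contains_iff_mem_keys _ _).mpr (h ▸ hm))
    rw [if_neg hc]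
    refine ⟨(PySem.Set.add_of_not_mem hmem).symm, ?_⟩
    show ord ++ [ab.2] = ((pr.insert ab.2 []).modify ab.2 [] (fun l => l ++ [ab.1])).keys
    rw [PySem.Dict.keys_modify,
      PySem.Dict.keys_insert_of_contains _ _ (PySem.Dict.contains_insert_self _ _ _),
      PySem.Dict.keys_insert_of_not_contains _ _ (by simp [hc]), h]

theorem pvBuildPreds_ord_aux (conn : List (Int × Int)) :
    ∀ (pr : PySem.Dict Int (List Int)) (ord : List Int), ord = pr.keys →
      (conn.foldl pvPredsStep (pr, ord)).2 = PySem.Set.update ord (conn.map (fun p => p.2)) := by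
  induction conn with
  | nil => intro pr ord h; simp
  | cons ab rest ih =>
    intro pr ord h
    rw [List.foldl_cons, List.map_cons, PySem.Set.update_cons]
    obtain ⟨h1, h2⟩ := pvPredsStep_snd_keys pr ord ab h
    have : (pvPredsStep (pr, ord) ab) = ((pvPredsStep (pr, ord) ab).1, (pvPredsStep (pr, ord) ab).2) := rfl
    rw [this, ih _ _ h2, h1]

theorem pvBuildPreds_ord (connections : List (Int × Int)) :
    (pvBuildPreds connections).2 = PySem.Set.ofList (connections.map (fun p => p.2)) := by
  rw [pvBuildPreds, pvBuildPreds_ord_aux _ _ _ (by simp [PySem.Dict.keys_empty])]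
  exact PySem.Set.update_nil_left _

theorem pvMem_foldl_ifadd (req : List Int) (l : List Int) :
    ∀ (acc : List Int) (x : Int),
      x ∈ l.foldl (fun acc p => if !(PySem.Set.contains req p) then PySem.Set.add acc p else acc) acc ↔
        x ∈ acc ∨ (x ∈ l ∧ x ∉ req) := by
  induction l with
  | nil => simp
  | cons p t ih =>
    intro acc x
    rw [List.foldl_cons]
    by_cases hp : p ∈ req
    · rw [if_neg (by simp [hp]), ih]
      constructor
      · rintro (h | h)
        · exact Or.inl h
        · exact Or.inr ⟨List.mem_cons_of_mem _ h.1, h.2⟩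
      · rintro (h | ⟨hm, hr⟩)
        · exact Or.inl h
        · rcases List.mem_cons.mp hm with rfl | hm'
          · exact absurd hp hr
          · exact Or.inr ⟨hm', hr⟩
    · rw [if_pos (by simp [hp]), ih]
      rw [PySem.Set.mem_add]
      constructor
      · rintro ((h | rfl) | h)
        · exact Or.inl h
        · exact Or.inr ⟨List.mem_cons_self .., hp⟩
        · exact Or.inr ⟨List.mem_cons_of_mem _ h.1, h.2⟩
      · rintro (h | ⟨hm, hr⟩)
        · exact Or.inl (Or.inl h)
        · rcases List.mem_cons.mp hm with rfl | hm'
          · exact Or.inl (Or.inr rfl)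
          · exact Or.inr ⟨hm', hr⟩

theorem pvMem_frontierStep (preds : PySem.Dict Int (List Int)) (req fr : PySem.Set Int) (x : Int) :
    x ∈ pvFrontierStep preds req fr ↔ x ∉ req ∧ ∃ n ∈ fr, x ∈ preds.getD n [] := by
  unfold pvFrontierStep
  have main : ∀ (frl acc : List Int),
      x ∈ frl.foldl (fun acc n =>
        (preds.getD n []).foldl (fun acc p =>
          if !(PySem.Set.contains req p) then PySem.Set.add acc p else acc) acc) acc ↔
        x ∈ acc ∨ ∃ n ∈ frl, x ∈ preds.getD n [] ∧ x ∉ req := by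
    intro frl
    induction frl with
    | nil => simp
    | cons n t ih =>
      intro acc
      rw [List.foldl_cons, ih, pvMem_foldl_ifadd]
      constructor
      · rintro ((h | h) | ⟨m, hm, hx⟩)
        · exact Or.inl h
        · exact Or.inr ⟨n, List.mem_cons_self .., h⟩
        · exact Or.inr ⟨m, List.mem_cons_of_mem _ hm, hx⟩
      · rintro (h | ⟨m, hm, hx⟩)
        · exact Or.inl (Or.inl h)
        · rcases List.mem_cons.mp hm with rfl | hm'
          · exact Or.inl (Or.inr hx)
          · exact Or.inr ⟨m, hm', hx⟩
  rw [main]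
  simp only [PySem.Set.empty]
  constructor
  · rintro (h | ⟨n, hn, hx, hr⟩)
    · simp at h
    · exact ⟨hr, n, hn, hx⟩
  · rintro ⟨hr, n, hn, hx⟩
    exact Or.inr ⟨n, hn, hx, hr⟩


theorem pvReqLoop_nil_frontier (preds : PySem.Dict Int (List Int)) :
    ∀ (n : Nat) (req : PySem.Set Int), pvReqLoop preds n req [] = req := by
  intro n req
  cases n <;> simp [pvReqLoop]

theorem pvReq_loop_memEq (connections : List (Int × Int)) (preds : PySem.Dict Int (List Int))
    (hp : ∀ nd, preds.getD nd [] = (connections.filter (fun p => p.2 == nd)).map (fun p => p.1)) :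
    ∀ (n : Nat) (inf req fr : PySem.Set Int),
      pvMemEq inf req →
      (∀ x ∈ fr, x ∈ req) →
      (∀ ab ∈ connections, ab.2 ∈ req → ab.2 ∉ fr → ab.1 ∈ req) →
      pvMemEq (pvInfectLoop connections n inf) (pvReqLoop preds n req fr) := by
  intro n
  induction n with
  | zero => intro inf req fr h1 _ _; simpa [pvInfectLoop, pvReqLoop] using h1
  | succ n ih =>
    intro inf req fr h1 h2 h3
    have hstep : ∀ x, x ∈ pvInfectStep connections inf ↔ x ∈ pvFrontierStep preds req fr := by
      intro x
      rw [pvMem_infectStep, pvMem_frontierStep]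
      constructor
      · rintro ⟨ab, hab, rfl, hni, hbi⟩
        have hxr : ab.1 ∉ req := fun hr => hni ((h1 ab.1).mpr hr)
        have hbreq : ab.2 ∈ req := (h1 ab.2).mp hbi
        have hbfr : ab.2 ∈ fr := by
          by_contra hbf
          exact hxr (h3 ab hab hbreq hbf)
        refine ⟨hxr, ab.2, hbfr, ?_⟩
        rw [hp]
        exact List.mem_map.mpr ⟨ab, List.mem_filter.mpr ⟨hab, by simp⟩, rfl⟩
      · rintro ⟨hxr, nd, hnfr, hx⟩
        rw [hp] at hx
        obtain ⟨ab, habf, rfl⟩ := List.mem_map.mp hx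
        have hab := (List.mem_filter.mp habf).1
        have hsnd : ab.2 = nd := by simpa using (List.mem_filter.mp habf).2
        exact ⟨ab, hab, rfl, fun hi => hxr ((h1 _).mp hi), (h1 _).mpr (hsnd ▸ h2 nd hnfr)⟩
    by_cases hfr : fr.isEmpty
    · have hfr' : fr = [] := List.isEmpty_iff.mp hfr
      have hNA : pvInfectStep connections inf = [] := by
        rw [List.eq_nil_iff_forall_not_mem]
        intro x hx
        rcases (pvMem_frontierStep preds req fr x).mp ((hstep x).mp hx) with ⟨_, nd, hn, _⟩
        rw [hfr'] at hn
        simp at hn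
      simp only [pvInfectLoop, pvReqLoop, hNA, hfr, List.isEmpty_nil, if_true]
      exact h1
    · by_cases hNB : (pvFrontierStep preds req fr).isEmpty
      · have hNB' : pvFrontierStep preds req fr = [] := List.isEmpty_iff.mp hNB
        have hNA : pvInfectStep connections inf = [] := by
          rw [List.eq_nil_iff_forall_not_mem]
          intro x hx
          have := (hstep x).mp hx
          rw [hNB'] at this
          simp at this
        simp only [pvInfectLoop, pvReqLoop, hNA, hfr, hNB', List.isEmpty_nil, if_true,
          Bool.false_eq_true, if_false, pvReqLoop_nil_frontier]
        intro x
        rw [PySem.Set.mem_union]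
        simp [h1 x]
      · have hNB' : pvFrontierStep preds req fr ≠ [] := fun hh => by rw [hh] at hNB; simp at hNB
        have hNA' : pvInfectStep connections inf ≠ [] := by
          rcases List.exists_mem_of_ne_nil _ hNB' with ⟨x, hx⟩
          intro hh
          have := (hstep x).mpr hx
          rw [hh] at this
          simp at this
        have hrec := ih (PySem.Set.union inf (pvInfectStep connections inf))
          (PySem.Set.union req (pvFrontierStep preds req fr)) (pvFrontierStep preds req fr)
          (by
            intro x
            rw [PySem.Set.mem_union, PySem.Set.mem_union]
            exact or_congr (h1 x) (hstep x))
          (by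
            intro x hx
            rw [PySem.Set.mem_union]
            exact Or.inr hx)
          (by
            intro ab hab hb2 hb2n
            rw [PySem.Set.mem_union] at hb2 ⊢
            rcases hb2 with hb2 | hb2
            · by_cases hbf : ab.2 ∈ fr
              · by_cases ha : ab.1 ∈ req
                · exact Or.inl ha
                · refine Or.inr ((pvMem_frontierStep preds req fr ab.1).mpr ⟨ha, ab.2, hbf, ?_⟩)
                  rw [hp]
                  exact List.mem_map.mpr ⟨ab, List.mem_filter.mpr ⟨hab, by simp⟩, rfl⟩
              · exact Or.inl (h3 ab hab hb2 hbf)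
            · exact absurd hb2 hb2n)
        simp only [pvInfectLoop, pvReqLoop, hfr, Bool.false_eq_true, if_false]
        rw [if_neg (by simpa [List.isEmpty_iff] using hNA')]
        exact hrec

-- one round: A's next_nodes is exactly B's layer
theorem pvNext_eq_layerOf (connections : List (Int × Int)) (preds : PySem.Dict Int (List Int))
    (order : List Int)
    (hp : ∀ nd, preds.getD nd [] = (connections.filter (fun p => p.2 == nd)).map (fun p => p.1))
    (hord : order = PySem.Set.ofList (connections.map (fun p => p.2)))
    (reqA reqB sA sB : PySem.Set Int) (hreq : pvMemEq reqA reqB) (hs : pvMemEq sA sB) :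
    pvNext connections reqA sA = pvLayerOf preds order reqB sB := by
  subst hord
  have hsc := pvContains_eq hs
  have hrc := pvContains_eq hreq
  unfold pvNext pvCandidates pvLayerOf
  rw [hsc, hrc]
  simp only [hp, List.all_map, PySem.Set.empty]
  rw [PySem.List.foldl_if_eq_foldl_filter
    (p := fun c => PySem.Set.contains reqB c &&
      (connections.filter (fun io => io.2 == c)).all (fun io => PySem.Set.contains sB io.1))
    (f := PySem.Set.add), ← PySem.Set.ofList_eq_foldl, pvOfList_filter, PySem.Set.ofList_ofList]
  have hcongr : List.filter (fun c => PySem.Set.contains reqB c &&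
        (connections.filter (fun io => io.2 == c)).all (fun io => PySem.Set.contains sB io.1))
        ((connections.filter (fun ab =>
          PySem.Set.contains sB ab.1 && !PySem.Set.contains sB ab.2)).map (fun ab => ab.2))
      = List.filter (fun t => !PySem.Set.contains sB t && PySem.Set.contains reqB t &&
          (connections.filter (fun p => p.2 == t)).all (fun p => PySem.Set.contains sB p.1))
        ((connections.filter (fun ab =>
          PySem.Set.contains sB ab.1 && !PySem.Set.contains sB ab.2)).map (fun ab => ab.2)) := by
    apply List.filter_congr
    intro x hx
    obtain ⟨ab, habf, rfl⟩ := List.mem_map.mp hx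
    have hq := (List.mem_filter.mp habf).2
    have hns : PySem.Set.contains sB ab.2 = false := by
      revert hq
      cases PySem.Set.contains sB ab.2 <;> simp
    simp [Bool.and_assoc]
    intro _ _ hmem
    rw [(PySem.Set.contains_iff _ _).mpr hmem] at hns
    simp at hns
  rw [hcongr, pvFilter_mapSnd_filter
    (h := by
      intro ab hab hP
      have h1 : (!PySem.Set.contains sB ab.2) = true := by
        revert hP
        cases PySem.Set.contains sB ab.2 <;> simp
      have h2 : PySem.Set.contains sB ab.1 = true := by
        have hall : ((connections.filter (fun p => p.2 == ab.2)).all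
            (fun p => PySem.Set.contains sB p.1)) = true := by
          revert hP
          cases hv : ((connections.filter (fun p => p.2 == ab.2)).all
            (fun p => PySem.Set.contains sB p.1)) <;> simp
        rw [List.all_eq_true] at hall
        exact hall ab (List.mem_filter.mpr ⟨hab, by simp⟩)
      rw [h2, Bool.true_and]
      exact h1),
    ← pvOfList_filter]
  apply List.filter_congr
  intro x _
  simp [Function.comp]

theorem pvLayerOf_nodup (preds : PySem.Dict Int (List Int)) (connections : List (Int × Int))
    (required s : PySem.Set Int) :
    (pvLayerOf preds (PySem.Set.ofList (connections.map (fun p => p.2))) required s).Nodup := by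
  exact (PySem.Set.nodup_ofList _).filter _

-- lockstep simulation of the two layering loops
theorem pvLoops_eq (connections : List (Int × Int)) (preds : PySem.Dict Int (List Int))
    (order : List Int)
    (hp : ∀ nd, preds.getD nd [] = (connections.filter (fun p => p.2 == nd)).map (fun p => p.1))
    (hord : order = PySem.Set.ofList (connections.map (fun p => p.2)))
    (reqA reqB : PySem.Set Int) (hreq : pvMemEq reqA reqB) :
    ∀ (n : Nat) (layers : List (List Int)) (sA sB : PySem.Set Int), pvMemEq sA sB →
      pvLayersLoop connections reqA n layers sA = pvAltLoop preds order reqB n layers sB := by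
  intro n
  induction n with
  | zero => intro layers sA sB _; rfl
  | succ n ih =>
    intro layers sA sB hs
    have hlayer := pvNext_eq_layerOf connections preds order hp hord reqA reqB sA sB hreq hs
    have hnd : (pvLayerOf preds order reqB sB).Nodup := by
      rw [hord]; exact pvLayerOf_nodup preds connections reqB sB
    simp only [pvLayersLoop, pvAltLoop, hlayer, PySem.Set.ofList_eq_self_of_nodup _ hnd]
    by_cases hemp : (pvLayerOf preds order reqB sB).isEmpty
    · rw [if_pos hemp, if_pos hemp]
    · rw [if_neg hemp, if_neg hemp]
      apply ih
      intro x
      rw [PySem.Set.mem_union, PySem.Set.mem_update]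
      exact or_congr (hs x) Iff.rfl


-- ===== VERDICT (by name: the statement is the Claim_ definition above) =====
theorem feed_forward_layers_spec : Claim_equal_feed_forward_layers := by
  intro inputs outputs connections _
  unfold Spec_feed_forward_layers feed_forward_layers feed_forward_layers_alt
  have hp := pvBuildPreds_getD connections
  have hord := pvBuildPreds_ord connections
  have hreqloop := pvReq_loop_memEq connections (pvBuildPreds connections).1 hp
    (connections.length + 1) (PySem.Set.ofList outputs) (PySem.Set.ofList outputs)
    (PySem.Set.ofList outputs) (fun _ => Iff.rfl) (fun _ h => h)
    (fun ab _ h2 h2n => absurd h2 h2n)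
  apply pvLoops_eq connections (pvBuildPreds connections).1 (pvBuildPreds connections).2 hp hord
  · intro x
    unfold pvRequiredForOutput
    rw [PySem.Set.mem_diff, PySem.Set.mem_diff]
    exact and_congr (hreqloop x) Iff.rfl
  · exact fun _ => Iff.rfl
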